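-- pv_equiv track=rewrite | github.com/OnlpLab/AlephBERT | bclm/treebank.py | _unify_multi_value_feats
-- ===== SOURCE A (Python) =====
-- from collections import Counter, defaultdict
--
-- def _unify_multi_value_feats(feats_str: str) -> str:
--     features = defaultdict(set)
--     for feat in feats_str.split('|'):
--         parts = feat.split('=')
--         if len(parts) == 2:
--             features[parts[0]].add(parts[1])
--     feats = []
--     for fname in sorted(features):
--         fvalue = ','.join(sorted(features[fname]))
--         feat_str = f'{fname}={fvalue}'
--         feats.append(feat_str)
--     if len(feats) == 0:
--         return '_'
--     return '|'.join(feats)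
-- ===== SOURCE B (Python) =====
-- def _unify_multi_value_feats(feats_str: str) -> str:
--     pairs = [p for p in (feat.split('=') for feat in feats_str.split('|')) if len(p) == 2]
--     names = sorted({p[0] for p in pairs})
--     groups = [n + '=' + ','.join(sorted({p[1] for p in pairs if p[0] == n})) for n in names]
--     return '|'.join(groups) if groups else '_'
-- ===== Notes on version B (the rewrite author's own statement) =====
-- stated objective: simpler
-- what changed: Replaces the defaultdict-of-sets grouping pass with a flat list of name/value pairs plus per-name filtered comprehensions over it (no mapping maintained at all).
import Mathlib
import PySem

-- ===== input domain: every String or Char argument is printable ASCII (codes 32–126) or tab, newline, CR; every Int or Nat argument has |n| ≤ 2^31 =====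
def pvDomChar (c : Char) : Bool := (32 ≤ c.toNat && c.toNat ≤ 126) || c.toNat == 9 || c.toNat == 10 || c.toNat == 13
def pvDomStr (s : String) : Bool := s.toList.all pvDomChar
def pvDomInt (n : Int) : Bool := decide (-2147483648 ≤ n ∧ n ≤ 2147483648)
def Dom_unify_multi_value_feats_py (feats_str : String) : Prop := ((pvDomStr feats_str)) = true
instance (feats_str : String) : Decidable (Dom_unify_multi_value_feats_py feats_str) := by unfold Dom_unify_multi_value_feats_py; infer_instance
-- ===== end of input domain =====

-- B replaces A's defaultdict-of-sets grouping pass by a flat list of split pairs with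
-- per-name filtered comprehensions (objective: simpler — no dict is maintained).

-- s.split(sep) for the non-empty literal separators "|" "=" used below: exact (split? is none only for sep = "")
def pvSplit (s sep : String) : List String := (PySem.Str.split? s sep).getD []

-- ===== PORT A =====
def unify_multi_value_feats_py (feats_str : String) : String :=
  let features : PySem.Dict String (PySem.Set String) :=
    (pvSplit feats_str "|").foldl (fun d feat =>
      let parts := pvSplit feat "="
      if parts.length == 2 then
        d.modify (parts[0]!) [] (fun s => PySem.Set.add s (parts[1]!))
      else d) PySem.Dict.empty
  let feats := (PySem.List.sorted features.keys (fun x => x) false).map (fun fname =>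
      let fvalue := PySem.Str.join "," (PySem.List.sorted (features.getD fname []) (fun x => x) false)
      fname ++ "=" ++ fvalue)
  if feats.length == 0 then "_" else PySem.Str.join "|" feats

-- ===== PORT B =====
def unify_multi_value_feats_py_alt (feats_str : String) : String :=
  let pairs := ((pvSplit feats_str "|").map (fun feat => pvSplit feat "=")).filter (fun p => p.length == 2)
  let names := PySem.List.sorted (PySem.Set.ofList (pairs.map (fun p => p[0]!))) (fun x => x) false
  let groups := names.map (fun n =>
      n ++ "=" ++ PySem.Str.join "," (PySem.List.sorted (PySem.Set.ofList ((pairs.filter (fun p => p[0]! == n)).map (fun p => p[1]!))) (fun x => x) false))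
  if groups.length != 0 then PySem.Str.join "|" groups else "_"

-- ===== PRECONDITION & SPEC =====
def Spec_unify_multi_value_feats_py (feats_str : String) (out : String) : Prop := out = unify_multi_value_feats_py_alt feats_str
instance (feats_str : String) (out : String) : Decidable (Spec_unify_multi_value_feats_py feats_str out) := by unfold Spec_unify_multi_value_feats_py; infer_instance

-- ===== CLAIM (what is proved, stated in full; the proofs are below) =====
def Claim_equal_unify_multi_value_feats_py : Prop := ∀ (feats_str : String), Dom_unify_multi_value_feats_py feats_str → Spec_unify_multi_value_feats_py feats_str (unify_multi_value_feats_py feats_str)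

-- ===== LEMMAS AND PROOFS =====

-- the loop body of A's grouping pass
def pvStepA (d : PySem.Dict String (PySem.Set String)) (feat : String) : PySem.Dict String (PySem.Set String) :=
  let parts := pvSplit feat "="
  if parts.length == 2 then
    d.modify (parts[0]!) [] (fun s => PySem.Set.add s (parts[1]!))
  else d

-- B's flat pair list for a given split list
def pvPairs (L : List String) : List (List String) :=
  (L.map (fun feat => pvSplit feat "=")).filter (fun p => p.length == 2)

lemma pv_keys_insert_eq_add {d : PySem.Dict String (PySem.Set String)} (k : String) (v : PySem.Set String) :
    (d.insert k v).keys = PySem.Set.add d.keys k := by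
  by_cases h : d.contains k
  · rw [PySem.Dict.keys_insert_of_contains _ _ h]
    unfold PySem.Set.add
    rw [if_pos (by rw [PySem.Set.contains_iff]; exact (PySem.Dict.contains_iff_mem_keys d k).mp h)]
  · rw [PySem.Dict.keys_insert_of_not_contains _ _ (by simpa using h)]
    unfold PySem.Set.add
    rw [if_neg (by rw [PySem.Set.contains_iff]; exact fun hm => h ((PySem.Dict.contains_iff_mem_keys d k).mpr hm))]

lemma pvPairs_cons (feat : String) (L : List String) :
    pvPairs (feat :: L) = if (pvSplit feat "=").length == 2 then pvSplit feat "=" :: pvPairs L else pvPairs L := by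
  by_cases h : (pvSplit feat "=").length == 2
  · simp [pvPairs, h]
  · simp [pvPairs, h]

lemma pvKeys (L : List String) : ∀ d : PySem.Dict String (PySem.Set String),
    (L.foldl pvStepA d).keys = ((pvPairs L).map (fun p => p[0]!)).foldl PySem.Set.add d.keys := by
  induction L with
  | nil => intro d; simp [pvPairs]
  | cons feat L ih =>
    intro d
    rw [List.foldl_cons, pvPairs_cons, ih]
    by_cases h : (pvSplit feat "=").length == 2
    · rw [if_pos h]
      simp only [pvStepA, h, if_pos, List.map_cons, List.foldl_cons]
      rw [PySem.Dict.keys_modify, pv_keys_insert_eq_add]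
    · rw [if_neg h]
      simp only [pvStepA, h]
      simp

lemma pvGetD (L : List String) (n : String) : ∀ d : PySem.Dict String (PySem.Set String),
    (L.foldl pvStepA d).getD n [] =
      (((pvPairs L).filter (fun p => p[0]! == n)).map (fun p => p[1]!)).foldl PySem.Set.add (d.getD n []) := by
  induction L with
  | nil => intro d; simp [pvPairs]
  | cons feat L ih =>
    intro d
    rw [List.foldl_cons, pvPairs_cons, ih]
    by_cases h : (pvSplit feat "=").length == 2
    · rw [if_pos h]
      simp only [pvStepA, h, if_pos]
      by_cases hk : (pvSplit feat "=")[0]! = n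
      · rw [List.filter_cons_of_pos (by simpa using hk), List.map_cons, List.foldl_cons, hk,
          PySem.Dict.getD_modify_self]
      · rw [List.filter_cons_of_neg (by simpa using hk),
          PySem.Dict.getD_modify_of_ne _ _ _ (Ne.symm hk)]
    · rw [if_neg h]
      simp only [pvStepA, h]
      simp

-- ===== VERDICT (by name: the statement is the Claim_ definition above) =====
theorem unify_multi_value_feats_py_spec : Claim_equal_unify_multi_value_feats_py := by
  intro feats_str _
  unfold Spec_unify_multi_value_feats_py unify_multi_value_feats_py unify_multi_value_feats_py_alt
  set L := pvSplit feats_str "|" with hL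
  have hfold : L.foldl (fun d feat =>
      let parts := pvSplit feat "="
      if parts.length == 2 then
        d.modify (parts[0]!) [] (fun s => PySem.Set.add s (parts[1]!))
      else d) PySem.Dict.empty = L.foldl pvStepA PySem.Dict.empty := rfl
  have hpairs : ((L.map (fun feat => pvSplit feat "=")).filter (fun p => p.length == 2)) = pvPairs L := rfl
  simp only [hfold, hpairs]
  have hkeys : (L.foldl pvStepA PySem.Dict.empty).keys
      = PySem.Set.ofList ((pvPairs L).map (fun p => p[0]!)) := by
    rw [pvKeys, PySem.Set.ofList_eq_foldl, PySem.Dict.keys_empty]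
  have hval : ∀ n, (L.foldl pvStepA PySem.Dict.empty).getD n []
      = PySem.Set.ofList (((pvPairs L).filter (fun p => p[0]! == n)).map (fun p => p[1]!)) := by
    intro n
    rw [pvGetD, PySem.Set.ofList_eq_foldl, PySem.Dict.getD_empty]
  rw [hkeys]
  have hmap :
      (PySem.List.sorted (PySem.Set.ofList ((pvPairs L).map (fun p => p[0]!))) (fun x => x) false).map
        (fun fname => fname ++ "=" ++ PySem.Str.join ","
          (PySem.List.sorted ((L.foldl pvStepA PySem.Dict.empty).getD fname []) (fun x => x) false))
      = (PySem.List.sorted (PySem.Set.ofList ((pvPairs L).map (fun p => p[0]!))) (fun x => x) false).map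
        (fun n => n ++ "=" ++ PySem.Str.join ","
          (PySem.List.sorted (PySem.Set.ofList (((pvPairs L).filter (fun p => p[0]! == n)).map (fun p => p[1]!))) (fun x => x) false)) := by
    apply List.map_congr_left
    intro n _
    rw [hval]
  rw [hmap]
  set gs := (PySem.List.sorted (PySem.Set.ofList ((pvPairs L).map (fun p => p[0]!))) (fun x => x) false).map
        (fun n => n ++ "=" ++ PySem.Str.join ","
          (PySem.List.sorted (PySem.Set.ofList (((pvPairs L).filter (fun p => p[0]! == n)).map (fun p => p[1]!))) (fun x => x) false)) with hgs
  by_cases hlen : gs.length = 0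
  · simp [hlen]
  · simp [hlen]
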